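-- pv_equiv track=rewrite | github.com/duncagre/CS361-Team31-Task-Tagging-Microservice | task_tagging_microservice/app.py | filter_tasks_by_tags
-- ===== SOURCE A (Python) =====
-- def clean_text(text):
--     """
--     Cleans extra whitespace from text.
--     """
--     return " ".join(str(text).split()).strip()
--
-- def normalize_tag(tag_text):
--     """
--     Cleans a tag and converts it to lowercase.
--     """
--     return clean_text(tag_text).lower()
--
-- def filter_tasks_by_tags(task_list, required_tags):
--     """
--     Returns tasks that contain all required tags.
--     """
--     results = []
--
--     for task in task_list:
--         if "tags" not in task:
--             continue
--
--         task_tags = []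
--         for tag in task["tags"]:
--             task_tags.append(normalize_tag(tag))
--
--         matches = True
--
--         for required_tag in required_tags:
--             if required_tag not in task_tags:
--                 matches = False
--
--         if matches:
--             results.append(task)
--
--     return results
-- ===== SOURCE B (Python) =====
-- def clean_text(text):
--     return " ".join(str(text).split()).strip()
--
--
-- def normalize_tag(tag_text):
--     return clean_text(tag_text).lower()
--
--
-- def filter_tasks_by_tags(task_list, required_tags):
--     """Candidate-refinement filtering: precompute each tagged task's normalized
--     tag set once, then narrow the candidate list once per required tag."""
--     candidates = [(task, {normalize_tag(t) for t in task["tags"]})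
--                   for task in task_list if "tags" in task]
--     for required_tag in required_tags:
--         candidates = [c for c in candidates if required_tag in c[1]]
--     return [task for task, _ in candidates]
-- ===== Notes on version B (the rewrite author's own statement) =====
-- stated objective: alternative
-- what changed: Replaces the per-task inner membership loop with candidate refinement: one comprehension collects tasks that have tags together with a precomputed normalized tag SET, then the candidate list is narrowed once per required tag (transposed loop order), and set membership replaces linear scans over the normalized tag list.
import Mathlib
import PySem

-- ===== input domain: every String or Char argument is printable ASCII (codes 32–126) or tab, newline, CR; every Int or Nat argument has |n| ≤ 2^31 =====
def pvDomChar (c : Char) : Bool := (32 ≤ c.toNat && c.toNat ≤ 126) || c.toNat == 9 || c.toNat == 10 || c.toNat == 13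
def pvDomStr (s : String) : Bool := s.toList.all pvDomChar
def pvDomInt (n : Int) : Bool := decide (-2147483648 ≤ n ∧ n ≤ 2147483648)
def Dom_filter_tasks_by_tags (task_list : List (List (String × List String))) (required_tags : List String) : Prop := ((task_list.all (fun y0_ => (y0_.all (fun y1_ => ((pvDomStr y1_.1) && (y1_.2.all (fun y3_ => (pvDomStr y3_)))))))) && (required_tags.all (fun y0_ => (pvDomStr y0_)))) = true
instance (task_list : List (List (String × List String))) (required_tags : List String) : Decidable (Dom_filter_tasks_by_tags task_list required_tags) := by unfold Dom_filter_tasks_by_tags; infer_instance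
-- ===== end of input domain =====

-- B replaces A's per-task inner membership loop by candidate refinement (filter once per
-- required tag over precomputed normalized tag sets); objective: alternative algorithm.

-- ===== PORT A =====
def pv_clean_text (text : String) : String :=
  PySem.Str.strip (PySem.Str.join " " (PySem.Str.split₀ text))

def pv_normalize_tag (tag_text : String) : String :=
  PySem.Str.lower (pv_clean_text tag_text)

def filter_tasks_by_tags (task_list : List (List (String × List String))) (required_tags : List String) : List (List (String × List String)) :=
  task_list.foldl (fun results task =>
    if (PySem.Dict.mk task).contains "tags" = false then results
    else
      let task_tags := (((PySem.Dict.mk task).get? "tags").getD []).foldl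
        (fun acc tag => acc ++ [pv_normalize_tag tag]) []
      let matched := required_tags.foldl
        (fun m required_tag => if task_tags.contains required_tag = false then false else m) true
      if matched then results ++ [task] else results) []

-- ===== PORT B =====
def filter_tasks_by_tags_alt (task_list : List (List (String × List String))) (required_tags : List String) : List (List (String × List String)) :=
  let candidates :=
    (task_list.filter (fun task => (PySem.Dict.mk task).contains "tags")).map
      (fun task =>
        (task, PySem.Set.ofList ((((PySem.Dict.mk task).get? "tags").getD []).map pv_normalize_tag)))
  (required_tags.foldl (fun cs required_tag => cs.filter (fun c => c.2.contains required_tag)) candidates).map (·.1)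

-- ===== PRECONDITION & SPEC =====
def Spec_filter_tasks_by_tags (task_list : List (List (String × List String))) (required_tags : List String) (out : List (List (String × List String))) : Prop := out = filter_tasks_by_tags_alt task_list required_tags
instance (task_list : List (List (String × List String))) (required_tags : List String) (out : List (List (String × List String))) : Decidable (Spec_filter_tasks_by_tags task_list required_tags out) := by unfold Spec_filter_tasks_by_tags; infer_instance

-- ===== CLAIM (what is proved, stated in full; the proofs are below) =====
def Claim_equal_filter_tasks_by_tags : Prop := ∀ (task_list : List (List (String × List String))) (required_tags : List String), Dom_filter_tasks_by_tags task_list required_tags → Spec_filter_tasks_by_tags task_list required_tags (filter_tasks_by_tags task_list required_tags)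

-- ===== LEMMAS AND PROOFS =====

-- The predicate A's per-task test computes (proof-only helper).
def pvA (rts : List String) (task : List (String × List String)) : Bool :=
  (PySem.Dict.mk task).contains "tags" &&
    rts.all (fun rt =>
      ((((PySem.Dict.mk task).get? "tags").getD []).map pv_normalize_tag).contains rt)

-- A's `matched` flag loop computes `b && rts.all q`.
theorem pv_matches_foldl (q : String → Bool) (rts : List String) (b : Bool) :
    rts.foldl (fun m rt => if q rt = false then false else m) b = (b && rts.all q) := by
  induction rts generalizing b with
  | nil => simp
  | cons rt rts ih =>
      simp only [List.foldl_cons, List.all_cons, ih]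
      cases q rt <;> simp

-- B's refinement loop is one filter by the conjunction of all required-tag tests.
theorem pv_refine_foldl {γ : Type} (p : String → γ → Bool) (rts : List String) (cs : List γ) :
    rts.foldl (fun cs rt => cs.filter (p rt)) cs
      = cs.filter (fun c => rts.all (fun rt => p rt c)) := by
  induction rts generalizing cs with
  | nil => simp
  | cons rt rts ih =>
      simp only [List.foldl_cons, ih, List.filter_filter, List.all_cons]
      apply List.filter_congr
      intro c _
      exact Bool.and_comm _ _

theorem pv_set_contains (l : List String) (x : String) :
    (PySem.Set.ofList l).contains x = l.contains x := by
  simp only [PySem.Set.contains]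
  by_cases h : x ∈ l
  · simp [(PySem.Set.mem_ofList l x).2 h, h]
  · simp [fun hh => h ((PySem.Set.mem_ofList l x).1 hh), h]

-- A's accumulator loop is `acc ++ filter (pvA rts)`.
theorem pv_A_foldl (rts : List String) (tl : List (List (String × List String)))
    (acc : List (List (String × List String))) :
    tl.foldl (fun results task =>
      if (PySem.Dict.mk task).contains "tags" = false then results
      else
        let task_tags := (((PySem.Dict.mk task).get? "tags").getD []).foldl
          (fun acc tag => acc ++ [pv_normalize_tag tag]) []
        let matched := rts.foldl
          (fun m required_tag => if task_tags.contains required_tag = false then false else m) true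
        if matched then results ++ [task] else results) acc
      = acc ++ tl.filter (pvA rts) := by
  induction tl generalizing acc with
  | nil => simp
  | cons task tl ih =>
      rw [List.foldl_cons, ih, List.filter_cons]
      simp only [PySem.List.foldl_append_singleton_eq_map, List.nil_append,
        pv_matches_foldl, Bool.true_and, pvA]
      cases Bool.eq_false_or_eq_true ((PySem.Dict.mk task).contains "tags") with
      | inl h1 => simp only [h1]; simp; try split_ifs <;> simp
      | inr h1 =>
          simp only [h1]
          cases Bool.eq_false_or_eq_true (rts.all fun rt =>
              ((((PySem.Dict.mk task).get? "tags").getD []).map pv_normalize_tag).contains rt) with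
          | inl h2 => simp only [Bool.true_and, h2]; simp
          | inr h2 => simp only [Bool.true_and, h2]; simp

-- ===== VERDICT (by name: the statement is the Claim_ definition above) =====
theorem filter_tasks_by_tags_spec : Claim_equal_filter_tasks_by_tags := by
  intro task_list required_tags _
  show filter_tasks_by_tags task_list required_tags
      = filter_tasks_by_tags_alt task_list required_tags
  unfold filter_tasks_by_tags filter_tasks_by_tags_alt
  rw [pv_A_foldl]
  simp only [pv_refine_foldl, List.filter_map, List.map_map, List.nil_append,
    Function.comp_def, List.filter_filter, List.map_id']
  apply List.filter_congr
  intro task _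
  simp only [pvA, pv_set_contains]
  exact (Bool.and_comm _ _).symm
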